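-- pv_equiv track=rewrite | github.com/carlosfernandezcabrero/CodeSignal-solutions | Lineup/main.py | solution
-- ===== SOURCE A (Python) =====
-- ms1 = {"L": 1, "R": -1, "A": -2}
--
-- ms2 = {"L": -1, "R": 1, "A": -2}
--
-- def solution(commands):
--     pos1, pos2 = [], []
--
--     if len(commands) == 0:
--         return 0
--
--     pos1.append((ms1[commands[0]]) % 4)
--     pos2.append((ms2[commands[0]]) % 4)
--
--     for ci in range(1, len(commands)):
--         c = commands[ci]
--
--         pos1.append((pos1[-1] + ms1[c]) % 4)
--         pos2.append((pos2[-1] + ms2[c]) % 4)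
--
--     return len(list(filter(lambda x: x[0] == x[1], zip(pos1, pos2))))
-- ===== SOURCE B (Python) =====
-- FLIP = {"L": 1, "R": 1, "A": 0}
--
-- def solution(commands):
--     parity = 0
--     count = 0
--     for c in commands:
--         parity = (parity + FLIP[c]) % 2
--         if parity == 0:
--             count += 1
--     return count
-- ===== Notes on version B (the rewrite author's own statement) =====
-- stated objective: simpler
-- what changed: Instead of building two position lists and zip-filtering them, B keeps a single parity bit (number of L/R commands seen mod 2) and counts the positions where it is 0, using the invariant that the two marchers coincide exactly when the prefix contains an even number of turns.
import Mathlib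
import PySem

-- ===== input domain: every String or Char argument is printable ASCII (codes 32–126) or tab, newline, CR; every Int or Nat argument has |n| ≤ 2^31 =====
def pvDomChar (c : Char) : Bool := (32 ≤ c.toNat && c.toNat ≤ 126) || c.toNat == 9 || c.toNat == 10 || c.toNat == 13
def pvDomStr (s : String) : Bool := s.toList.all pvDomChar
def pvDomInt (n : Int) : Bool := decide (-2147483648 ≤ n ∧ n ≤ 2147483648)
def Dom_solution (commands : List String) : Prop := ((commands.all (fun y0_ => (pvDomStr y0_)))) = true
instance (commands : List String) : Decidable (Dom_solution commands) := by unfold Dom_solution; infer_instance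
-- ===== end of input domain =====

-- B replaces A's two position lists and the final zip/filter count by a single running
-- parity bit with a counter (same O(n) time, O(1) space, shorter code).

-- ===== PORT A =====
def ms1 : PySem.Dict String Int := PySem.Dict.ofList [("L", 1), ("R", -1), ("A", -2)]
def ms2 : PySem.Dict String Int := PySem.Dict.ofList [("L", -1), ("R", 1), ("A", -2)]

-- the dictionary lookups ms1[c]/ms2[c] are ported with getD; Pre_solution restricts to
-- commands in {"L","R","A"}, exactly where the Python lookup does not raise KeyError
def solutionStep (st : List Int × List Int) (c : String) : List Int × List Int :=
  (st.1 ++ [PySem.Int.mod (PySem.List.pyGetD st.1 (-1) 0 + ms1.getD c 0) 4],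
   st.2 ++ [PySem.Int.mod (PySem.List.pyGetD st.2 (-1) 0 + ms2.getD c 0) 4])

def solution (commands : List String) : Int :=
  if commands.length = 0 then 0
  else
    match commands with
    | [] => 0
    | c0 :: _ =>
      let pos1 : List Int := [PySem.Int.mod (ms1.getD c0 0) 4]
      let pos2 : List Int := [PySem.Int.mod (ms2.getD c0 0) 4]
      let st := (PySem.List.pyRange 1 (commands.length : Int) 1).foldl
        (fun st ci => solutionStep st (PySem.List.pyGetD commands ci ""))
        (pos1, pos2)
      (((st.1.zip st.2).filter (fun x => x.1 == x.2)).length : Int)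

-- ===== PORT B =====
def flipTbl : PySem.Dict String Int := PySem.Dict.ofList [("L", 1), ("R", 1), ("A", 0)]

def altStep (st : Int × Int) (c : String) : Int × Int :=
  let parity := PySem.Int.mod (st.1 + flipTbl.getD c 0) 2
  (parity, if parity = 0 then st.2 + 1 else st.2)

def solution_alt (commands : List String) : Int :=
  (commands.foldl altStep ((0 : Int), (0 : Int))).2

-- ===== PRECONDITION & SPEC =====
-- Pre_ excludes exactly the inputs containing a command other than "L"/"R"/"A",
-- on which the Python A raises KeyError.
def Pre_solution (commands : List String) : Prop :=
  ∀ c ∈ commands, c = "L" ∨ c = "R" ∨ c = "A"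
instance (commands : List String) : Decidable (Pre_solution commands) := by
  unfold Pre_solution; infer_instance

def pvWitness_solution : List String := ["L", "A", "R", "R"]

def Spec_solution (commands : List String) (out : Int) : Prop := out = solution_alt commands
instance (commands : List String) (out : Int) : Decidable (Spec_solution commands out) := by unfold Spec_solution; infer_instance

-- ===== CLAIM (what is proved, stated in full; the proofs are below) =====
def Claim_equal_solution : Prop := ∀ (commands : List String), Dom_solution commands → Pre_solution commands → Spec_solution commands (solution commands)

-- ===== LEMMAS AND PROOFS =====

def pvCnt (l1 l2 : List Int) : Int := (((l1.zip l2).filter (fun x => x.1 == x.2)).length : Int)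

lemma pvCnt_append (l1 l2 : List Int) (a b : Int) (h : l1.length = l2.length) :
    pvCnt (l1 ++ [a]) (l2 ++ [b]) = pvCnt l1 l2 + (if a = b then 1 else 0) := by
  simp [pvCnt, List.zip_append h, List.filter_append]
  split_ifs with hab <;> simp [hab]

-- main invariant: folding A's step from lists ending in a, b with (a-b) % 4 = 2*p
-- counts exactly what B's fold counts from parity p
lemma pvMain (cs : List String) : ∀ (l1 l2 : List Int) (a b p : Int),
    (∀ c ∈ cs, c = "L" ∨ c = "R" ∨ c = "A") →
    l1.length = l2.length →
    0 ≤ a → a < 4 → 0 ≤ b → b < 4 →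
    (a - b) % 4 = 2 * p → (p = 0 ∨ p = 1) →
    pvCnt (cs.foldl solutionStep (l1 ++ [a], l2 ++ [b])).1
          (cs.foldl solutionStep (l1 ++ [a], l2 ++ [b])).2
      = (cs.foldl altStep (p, pvCnt (l1 ++ [a]) (l2 ++ [b]))).2 := by
  induction cs with
  | nil => intro l1 l2 a b p _ _ _ _ _ _ _ _; simp
  | cons c cs ih =>
    intro l1 l2 a b p hv hlen ha0 ha4 hb0 hb4 hd hp
    have hc : c = "L" ∨ c = "R" ∨ c = "A" := hv c (List.mem_cons_self ..)
    have hv' : ∀ x ∈ cs, x = "L" ∨ x = "R" ∨ x = "A" := fun x hx => hv x (List.mem_cons_of_mem _ hx)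
    obtain ⟨m1, m2, f, hm1, hm2, hf, hdiff⟩ :
        ∃ m1 m2 f : Int, ms1.getD c 0 = m1 ∧ ms2.getD c 0 = m2 ∧ flipTbl.getD c 0 = f ∧
          (m1 - m2) % 4 = 2 * (f % 2) ∧ (f = 0 ∨ f = 1) := by
      rcases hc with rfl | rfl | rfl
      · exact ⟨1, -1, 1, by decide⟩
      · exact ⟨-1, 1, 1, by decide⟩
      · exact ⟨-2, -2, 0, by decide⟩
    obtain ⟨hdm, hf01⟩ := hdiff
    set a' := (a + m1) % 4 with ha'
    set b' := (b + m2) % 4 with hb'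
    set p' := (p + f) % 2 with hp'
    have hstep : solutionStep (l1 ++ [a], l2 ++ [b]) c = ((l1 ++ [a]) ++ [a'], (l2 ++ [b]) ++ [b']) := by
      simp [solutionStep, PySem.List.pyGetD_neg_one_append_singleton, hm1, hm2, ha', hb']
    have hd' : (a' - b') % 4 = 2 * p' := by
      have h1 : (a' - b') % 4 = ((a - b) % 4 + (m1 - m2) % 4) % 4 := by
        rw [ha', hb']; omega
      rw [h1, hd, hdm, hp']
      rcases hp with rfl | rfl <;> rcases hf01 with rfl | rfl <;> norm_num
    have hBstep : altStep (p, pvCnt (l1 ++ [a]) (l2 ++ [b])) c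
        = (p', pvCnt ((l1 ++ [a]) ++ [a']) ((l2 ++ [b]) ++ [b'])) := by
      have hiff : a' = b' ↔ p' = 0 := by
        constructor <;> intro h
        · have : (a' - b') % 4 = 0 := by omega
          rw [hd'] at this
          rcases hp with rfl | rfl <;> rcases hf01 with rfl | rfl <;> omega
        · have hab : (a' - b') % 4 = 0 := by rw [hd', h]; ring
          have ha'0 : 0 ≤ a' := Int.emod_nonneg _ (by norm_num)
          have ha'4 : a' < 4 := Int.emod_lt_of_pos _ (by norm_num)
          have hb'0 : 0 ≤ b' := Int.emod_nonneg _ (by norm_num)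
          have hb'4 : b' < 4 := Int.emod_lt_of_pos _ (by norm_num)
          omega
      rw [pvCnt_append (l1 ++ [a]) (l2 ++ [b]) a' b' (by simp [hlen])]
      unfold altStep
      rw [hf, PySem.Int.mod_eq_emod_of_pos (by norm_num : (0:Int) < 2), ← hp']
      dsimp only
      by_cases h : p' = 0
      · rw [if_pos h, if_pos (hiff.mpr h)]
      · rw [if_neg h, if_neg (fun hab => h (hiff.mp hab))]
        ring_nf
    rw [List.foldl_cons, List.foldl_cons, hstep, hBstep]
    exact ih (l1 ++ [a]) (l2 ++ [b]) a' b' p' hv' (by simp [hlen])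
      (Int.emod_nonneg _ (by norm_num)) (Int.emod_lt_of_pos _ (by norm_num))
      (Int.emod_nonneg _ (by norm_num)) (Int.emod_lt_of_pos _ (by norm_num)) hd'
      (by rcases hp with rfl | rfl <;> rcases hf01 with rfl | rfl <;> norm_num [hp'])

-- ===== VERDICT (by name: the statement is the Claim_ definition above) =====
theorem solution_spec : Claim_equal_solution := by
  intro commands _hdom hpre
  unfold Spec_solution
  match commands with
  | [] => decide
  | c0 :: rest =>
    have hc0 : c0 = "L" ∨ c0 = "R" ∨ c0 = "A" := hpre c0 (List.mem_cons_self ..)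
    have hrest : ∀ c ∈ rest, c = "L" ∨ c = "R" ∨ c = "A" := fun c hc => hpre c (List.mem_cons_of_mem _ hc)
    have hdrop : ∀ st0 : List Int × List Int, (PySem.List.pyRange 1 ((c0 :: rest).length : Int) 1).foldl
        (fun st ci => solutionStep st (PySem.List.pyGetD (c0 :: rest) ci "")) st0
        = rest.foldl solutionStep st0 := by
      intro st0
      have := PySem.List.foldl_pyRange_pyGetD (c0 :: rest) "" solutionStep st0
        (a := 1) (by norm_num)
      simpa using this
    obtain ⟨a0, b0, p0, hA, hd0, hbounds, hp0, hstart⟩ :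
        ∃ a0 b0 p0 : Int,
          ([PySem.Int.mod (ms1.getD c0 0) 4], [PySem.Int.mod (ms2.getD c0 0) 4])
            = (([] : List Int) ++ [a0], ([] : List Int) ++ [b0]) ∧
          (a0 - b0) % 4 = 2 * p0 ∧ (0 ≤ a0 ∧ a0 < 4 ∧ 0 ≤ b0 ∧ b0 < 4) ∧ (p0 = 0 ∨ p0 = 1) ∧
          altStep (0, 0) c0 = (p0, pvCnt (([] : List Int) ++ [a0]) (([] : List Int) ++ [b0])) := by
      rcases hc0 with rfl | rfl | rfl
      · exact ⟨1, 3, 1, by decide⟩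
      · exact ⟨3, 1, 1, by decide⟩
      · exact ⟨2, 2, 0, by decide⟩
    have hmain := pvMain rest ([] : List Int) ([] : List Int) a0 b0 p0 hrest rfl
      hbounds.1 hbounds.2.1 hbounds.2.2.1 hbounds.2.2.2 hd0 hp0
    show solution (c0 :: rest) = solution_alt (c0 :: rest)
    unfold solution solution_alt
    simp only [List.foldl_cons, hstart]
    rw [if_neg (by simp)]
    simp only [hdrop, hA]
    simp only [pvCnt] at hmain
    exact hmain
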